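-- pv_equiv track=rewrite | github.com/Maddonix/ukw-ml-tools | src/ukw_ml_tools/wt/utils.py | merge_close_ranges
-- ===== SOURCE A (Python) =====
-- def merge_close_ranges(ranges, frame_diff):
--     ranges_merged = []
--     last = None
--
--     for i, _range in enumerate(ranges):
--         if i == 0:
--             last = _range
--             continue
--
--         _last = last[1]
--         _current = _range[0]
--         delta = _current - _last
--
--         if delta > frame_diff:
--             ranges_merged.append(last)
--             last = _range
--
--         else:
--             last = (last[0], _range[1])
--
--     if last:
--         ranges_merged.append(last)
--
--     return ranges_merged
-- ===== SOURCE B (Python) =====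
-- def merge_close_ranges(ranges, frame_diff):
--     if not ranges:
--         return []
--     n = len(ranges)
--     splits = [i for i in range(1, n)
--               if ranges[i][0] - ranges[i - 1][1] > frame_diff]
--     bounds = [0] + splits + [n]
--     return [(ranges[b][0], ranges[e - 1][1])
--             for b, e in zip(bounds, bounds[1:])]
-- ===== Notes on version B (the rewrite author's own statement) =====
-- stated objective: alternative
-- what changed: Replaces A's single pass with a running `last` accumulator and trailing append by two staged passes: a first pass collects the indices where the gap exceeds frame_diff as group boundaries, and a second pass emits one merged pair (first start, last end) per boundary-delimited group.
import Mathlib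
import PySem

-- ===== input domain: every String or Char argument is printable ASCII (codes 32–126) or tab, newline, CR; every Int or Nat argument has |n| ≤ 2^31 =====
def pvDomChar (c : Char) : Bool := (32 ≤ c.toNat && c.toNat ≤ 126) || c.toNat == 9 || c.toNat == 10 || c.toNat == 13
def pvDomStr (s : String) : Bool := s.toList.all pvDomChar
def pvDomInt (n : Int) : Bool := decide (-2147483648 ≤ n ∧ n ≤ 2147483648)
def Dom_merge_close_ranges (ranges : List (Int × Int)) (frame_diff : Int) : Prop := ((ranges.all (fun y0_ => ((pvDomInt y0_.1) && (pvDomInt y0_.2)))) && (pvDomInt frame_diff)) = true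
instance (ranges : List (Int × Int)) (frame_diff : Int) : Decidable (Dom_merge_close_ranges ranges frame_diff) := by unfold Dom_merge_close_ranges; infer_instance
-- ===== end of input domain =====

-- B replaces A's single pass with a running `last` accumulator by two staged passes:
-- first collect the boundary indices where the gap exceeds frame_diff, then emit one
-- merged pair per boundary-delimited group; objective: alternative decomposition, same O(n).

-- ===== PORT A =====
-- One step of A's for-loop body; state = (ranges_merged, last).
def mcrStepA (frame_diff : Int) (s : List (Int × Int) × Option (Int × Int)) (ir : Int × (Int × Int)) :
    List (Int × Int) × Option (Int × Int) :=
  if ir.1 = 0 then (s.1, some ir.2)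
  else
    match s.2 with
    | none => (s.1, some ir.2)   -- unreachable: last is set on the first iteration (i == 0)
    | some last =>
      if ir.2.1 - last.2 > frame_diff then (s.1 ++ [last], some ir.2)
      else (s.1, some (last.1, ir.2.2))

def merge_close_ranges (ranges : List (Int × Int)) (frame_diff : Int) : List (Int × Int) :=
  let st := (PySem.List.enumerate ranges).foldl (mcrStepA frame_diff) ([], none)
  match st.2 with
  | none => st.1              -- `if last:` — last is None only when ranges is empty
  | some last => st.1 ++ [last]

-- ===== PORT B =====
-- transliteration of Source B: boundary pass, then one merged pair per group.
def merge_close_ranges_alt (ranges : List (Int × Int)) (frame_diff : Int) : List (Int × Int) :=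
  if ranges = [] then []
  else
    let n : Int := ranges.length
    let splits : List Int := (PySem.List.pyRange 1 n 1).filter
      (fun i => (PySem.List.pyGetD ranges i (0, 0)).1 - (PySem.List.pyGetD ranges (i - 1) (0, 0)).2 > frame_diff)
    let bounds : List Int := 0 :: (splits ++ [n])
    (bounds.zip (PySem.List.slice bounds (some 1) none)).map
      (fun be => ((PySem.List.pyGetD ranges be.1 (0, 0)).1, (PySem.List.pyGetD ranges (be.2 - 1) (0, 0)).2))

-- ===== PRECONDITION & SPEC =====
def Spec_merge_close_ranges (ranges : List (Int × Int)) (frame_diff : Int) (out : List (Int × Int)) : Prop := out = merge_close_ranges_alt ranges frame_diff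
instance (ranges : List (Int × Int)) (frame_diff : Int) (out : List (Int × Int)) : Decidable (Spec_merge_close_ranges ranges frame_diff out) := by unfold Spec_merge_close_ranges; infer_instance

-- ===== CLAIM (what is proved, stated in full; the proofs are below) =====
def Claim_equal_merge_close_ranges : Prop := ∀ (ranges : List (Int × Int)) (frame_diff : Int), Dom_merge_close_ranges ranges frame_diff → Spec_merge_close_ranges ranges frame_diff (merge_close_ranges ranges frame_diff)

-- ===== LEMMAS AND PROOFS =====

-- Common recursive characterisation of the merge, used to bridge the two ports.
def mcrLoop (frame_diff : Int) (last : Int × Int) : List (Int × Int) → List (Int × Int)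
  | [] => [last]
  | r :: rs =>
      if r.1 - last.2 > frame_diff then last :: mcrLoop frame_diff r rs
      else mcrLoop frame_diff (last.1, r.2) rs

theorem foldA_loop (frame_diff : Int) (rs : List (Int × Int)) :
    ∀ (acc : List (Int × Int)) (last : Int × Int) (k : Int), 1 ≤ k →
    (match ((PySem.List.enumerate rs k).foldl (mcrStepA frame_diff) (acc, some last)).2 with
     | none => ((PySem.List.enumerate rs k).foldl (mcrStepA frame_diff) (acc, some last)).1
     | some l => ((PySem.List.enumerate rs k).foldl (mcrStepA frame_diff) (acc, some last)).1 ++ [l])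
      = acc ++ mcrLoop frame_diff last rs := by
  induction rs with
  | nil => intro acc last k hk; simp [PySem.List.enumerate_nil, mcrLoop]
  | cons r rs ih =>
      intro acc last k hk
      rw [PySem.List.enumerate_cons]
      simp only [List.foldl_cons]
      rw [show mcrStepA frame_diff (acc, some last) (k, r) =
        (if r.1 - last.2 > frame_diff then (acc ++ [last], some r) else (acc, some (last.1, r.2))) by
          simp [mcrStepA, show k ≠ 0 by omega]]
      by_cases hgt : r.1 - last.2 > frame_diff
      · rw [if_pos hgt, ih (acc ++ [last]) r (k + 1) (by omega)]
        simp only [mcrLoop, if_pos hgt, List.append_assoc, List.singleton_append]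
      · rw [if_neg hgt, ih acc (last.1, r.2) (k + 1) (by omega)]
        simp only [mcrLoop, if_neg hgt]

-- Emit one merged pair per group, reading boundaries off the bound list (proof-side helper).
def mcrEmit (ranges : List (Int × Int)) (a : Int) : List Int → List (Int × Int)
  | [] => []
  | j :: js =>
      (a, (PySem.List.pyGetD ranges (j - 1) (0, 0)).2) ::
        mcrEmit ranges (PySem.List.pyGetD ranges j (0, 0)).1 js

theorem mcrEmit_zip (ranges : List (Int × Int)) :
    ∀ (l : List Int) (b : Int),
      ((b :: l).zip l).map
          (fun be => ((PySem.List.pyGetD ranges be.1 (0, 0)).1, (PySem.List.pyGetD ranges (be.2 - 1) (0, 0)).2))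
        = mcrEmit ranges (PySem.List.pyGetD ranges b (0, 0)).1 l := by
  intro l
  induction l with
  | nil => intro b; simp [mcrEmit]
  | cons j js ih =>
      intro b
      simp only [List.zip_cons_cons, List.map_cons, mcrEmit]
      rw [ih j]

theorem mcrLoop_emit (ranges : List (Int × Int)) (frame_diff : Int) :
    ∀ (k : Nat), k < ranges.length → ∀ (a : Int),
      mcrLoop frame_diff (a, (PySem.List.pyGetD ranges (k : Int) (0, 0)).2) (ranges.drop (k + 1)) =
        mcrEmit ranges a
          ((PySem.List.pyRange ((k : Int) + 1) (ranges.length : Int) 1).filter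
            (fun i => (PySem.List.pyGetD ranges i (0, 0)).1 - (PySem.List.pyGetD ranges (i - 1) (0, 0)).2 > frame_diff)
            ++ [(ranges.length : Int)]) := by
  intro k
  induction hk : ranges.length - k using Nat.strong_induction_on generalizing k with
  | _ m ih =>
    intro hlt a
    have hgk : PySem.List.pyGetD ranges ((k : Int)) (0, 0) = ranges[k] :=
      PySem.List.pyGetD_ofNat ranges k (0, 0) hlt
    by_cases hend : k + 1 = ranges.length
    · have h1 : ((k : Int) + 1) = (ranges.length : Int) := by omega
      rw [h1, PySem.List.pyRange_one_eq_nil (le_refl _), List.drop_eq_nil_of_le (by omega)]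
      simp only [List.filter_nil, List.nil_append, mcrEmit, mcrLoop]
      rw [show (ranges.length : Int) - 1 = ((k : Int)) by omega, hgk]
    · have hlt1 : k + 1 < ranges.length := by omega
      have hcons : ranges.drop (k + 1) = ranges[k + 1] :: ranges.drop (k + 2) :=
        List.drop_eq_getElem_cons hlt1
      have hg1 : PySem.List.pyGetD ranges ((k : Int) + 1) (0, 0) = ranges[k + 1] := by
        have := PySem.List.pyGetD_ofNat ranges (k + 1) (0, 0) hlt1
        rw [← this]; norm_num
      have hIH := ih (ranges.length - (k + 1)) (by omega) (k + 1) rfl hlt1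
      push_cast at hIH
      rw [PySem.List.pyRange_one_cons (by exact_mod_cast hlt1)]
      rw [hcons]
      simp only [List.filter_cons]
      by_cases hgt : ranges[k + 1].1 - ranges[k].2 > frame_diff
      · rw [if_pos (by
          simp only [hg1, show (k : Int) + 1 - 1 = (k : Int) by ring, hgk]
          exact decide_eq_true hgt)]
        simp only [mcrLoop, hgk, if_pos hgt, List.cons_append, mcrEmit]
        rw [show (k : Int) + 1 - 1 = (k : Int) by ring, hgk, hg1]
        refine congrArg _ ?_
        have := hIH ranges[k + 1].1
        rw [hg1] at this
        exact this
      · rw [if_neg (by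
          simp only [hg1, show (k : Int) + 1 - 1 = (k : Int) by ring, hgk]
          simpa using hgt)]
        simp only [mcrLoop, hgk, if_neg hgt]
        have := hIH a
        rw [hg1] at this
        exact this

theorem ports_agree (ranges : List (Int × Int)) (frame_diff : Int) :
    merge_close_ranges ranges frame_diff = merge_close_ranges_alt ranges frame_diff := by
  cases ranges with
  | nil =>
      simp [merge_close_ranges, merge_close_ranges_alt, PySem.List.enumerate_nil]
  | cons r rs =>
      unfold merge_close_ranges
      rw [PySem.List.enumerate_cons]
      simp only [List.foldl_cons]
      rw [show mcrStepA frame_diff (([], none) : List (Int × Int) × Option (Int × Int)) ((0 : Int), r)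
            = ([], some r) by simp [mcrStepA]]
      have hA := foldA_loop frame_diff rs [] r (0 + 1) (by omega)
      simp only [List.nil_append] at hA
      rw [hA]
      unfold merge_close_ranges_alt
      rw [if_neg (by simp)]
      simp only [PySem.List.slice_from_one, List.tail_cons]
      rw [mcrEmit_zip (r :: rs) _ 0]
      rw [PySem.List.pyGetD_zero_cons]
      have hB := mcrLoop_emit (r :: rs) frame_diff 0 (by simp) r.1
      simp only [Nat.cast_zero, zero_add, List.drop_succ_cons, List.drop_zero,
        PySem.List.pyGetD_zero_cons] at hB
      exact hB

-- ===== VERDICT (by name: the statement is the Claim_ definition above) =====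
theorem merge_close_ranges_spec : Claim_equal_merge_close_ranges := by
  intro ranges frame_diff _
  exact ports_agree ranges frame_diff
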